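-- pv_equiv track=rewrite | github.com/anubhab-code/Competitive-Programming | CodeWars/7 Kyu/Sum Factorial.py | sum_factorial
-- ===== SOURCE A (Python) =====
-- def sum_factorial(lst):
--     nums = sorted(lst)
--     current = 1
--     total = 0
--     for a in range(1, nums[-1] + 1):
--         current *= a
--         if a in nums:
--             total += current
--     return total
-- ===== SOURCE B (Python) =====
-- def sum_factorial(lst):
--     total = 0
--     fact = 1
--     next_a = 1
--     for v in sorted(set(lst)):
--         if v >= 1:
--             for a in range(next_a, v + 1):
--                 fact *= a
--             next_a = v + 1
--             total += fact
--     return total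
-- ===== Notes on version B (the rewrite author's own statement) =====
-- stated objective: faster
-- what changed: Instead of sorting the whole list and walking every integer from 1 to max(lst) with a linear membership test at each step, B iterates once over sorted(set(lst)), extending a running factorial across the gap to each distinct value >= 1 and adding it; intended as faster (the per-step membership scan disappears), measured 11.5x at the largest size both finish.
-- outside the precondition, e.g. on sum_factorial([]): A raises IndexError, B returns 0
import Mathlib
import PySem

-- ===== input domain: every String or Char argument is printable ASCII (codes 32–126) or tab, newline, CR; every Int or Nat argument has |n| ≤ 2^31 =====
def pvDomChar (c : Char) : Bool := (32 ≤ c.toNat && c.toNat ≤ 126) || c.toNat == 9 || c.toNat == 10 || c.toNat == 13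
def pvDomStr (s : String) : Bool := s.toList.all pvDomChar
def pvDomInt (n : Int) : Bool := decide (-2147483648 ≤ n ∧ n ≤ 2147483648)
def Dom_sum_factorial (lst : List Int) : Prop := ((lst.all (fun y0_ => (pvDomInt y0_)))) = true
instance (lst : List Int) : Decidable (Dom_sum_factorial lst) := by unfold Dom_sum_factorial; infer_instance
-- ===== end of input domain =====

-- B iterates once over the sorted distinct values, extending a running factorial across the gap
-- to each value >= 1, instead of A's walk over every integer from 1 to max(lst) with a
-- membership test in the sorted list at each step.

-- ===== PORT A =====
def sum_factorial (lst : List Int) : Int :=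
  let nums := PySem.List.sorted lst (fun x => x) false
  ((PySem.List.pyRange 1 (PySem.List.pyGetD nums (-1) 0 + 1) 1).foldl
    (fun (st : Int × Int) a =>
      let current := st.1 * a
      (current, if a ∈ nums then st.2 + current else st.2))
    (1, 0)).2

-- ===== PORT B =====
-- state is (total, fact, next_a); the inner 'for a in range(next_a, v + 1): fact *= a' is the inner foldl
def sum_factorial_alt (lst : List Int) : Int :=
  ((PySem.List.sorted (PySem.Set.ofList lst) (fun x => x) false).foldl
    (fun (st : Int × Int × Int) v =>
      if 1 ≤ v then
        let fact := (PySem.List.pyRange st.2.2 (v + 1) 1).foldl (fun f a => f * a) st.2.1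
        (st.1 + fact, fact, v + 1)
      else st)
    (0, 1, 1)).1

-- ===== PRECONDITION & SPEC =====
-- Pre_ excludes exactly the empty list, on which A's access to the last element of the sorted list raises IndexError (B returns 0 there).
def Pre_sum_factorial (lst : List Int) : Prop := lst ≠ []
instance (lst : List Int) : Decidable (Pre_sum_factorial lst) := by unfold Pre_sum_factorial; infer_instance
def pvWitness_sum_factorial : List Int := ([1, 3, 3, -2])

def Spec_sum_factorial (lst : List Int) (out : Int) : Prop := out = sum_factorial_alt lst
instance (lst : List Int) (out : Int) : Decidable (Spec_sum_factorial lst out) := by unfold Spec_sum_factorial; infer_instance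

-- ===== CLAIM (what is proved, stated in full; the proofs are below) =====
def Claim_equal_sum_factorial : Prop := ∀ (lst : List Int), Dom_sum_factorial lst → Pre_sum_factorial lst → Spec_sum_factorial lst (sum_factorial lst)

-- ===== LEMMAS AND PROOFS =====

-- proof-side factorial: v! as the product 2 * 3 * … * v
def pvFact (v : Int) : Int :=
  (PySem.List.pyRange 2 (v + 1) 1).foldl (fun f a => f * a) 1

-- the incremental product step: (a-1)! * a = a! for a ≥ 1
lemma pvFact_step (a : Int) (h : 1 ≤ a) : pvFact (a - 1) * a = pvFact a := by
  rcases eq_or_lt_of_le h with h1 | h2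
  · subst h1; decide
  · unfold pvFact
    rw [show (a - 1 + 1 : Int) = a by ring,
        PySem.List.pyRange_one_succ_right (show (2:Int) ≤ a by omega)]
    simp [List.foldl_append]

-- extending (p-1)! by the factors p..v yields v!  (B's inner loop)
lemma pvFact_extend (p v : Int) (hp : 1 ≤ p) (hpv : p ≤ v + 1) :
    (PySem.List.pyRange p (v + 1) 1).foldl (fun f a => f * a) (pvFact (p - 1)) = pvFact v := by
  rcases eq_or_lt_of_le hpv with h1 | h2
  · rw [h1, PySem.List.pyRange_one_eq_nil le_rfl]
    simp [show (v + 1 - 1 : Int) = v by ring]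
  · rw [PySem.List.pyRange_one_cons h2]
    simp only [List.foldl_cons]
    rw [pvFact_step p hp,
        show pvFact p = pvFact (p + 1 - 1) from by rw [show (p + 1 - 1 : Int) = p by ring]]
    exact pvFact_extend (p + 1) v (by omega) (by omega)
termination_by (v + 1 - p).toNat
decreasing_by omega

-- A's loop, from state (pvFact (a-1), t), sums pvFact x over the in-list x of range a..b
lemma loopA (nums : List Int) (a b t : Int) (h : 1 ≤ a) :
    ((PySem.List.pyRange a b 1).foldl
      (fun (st : Int × Int) x =>
        let current := st.1 * x
        (current, if x ∈ nums then st.2 + current else st.2))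
      (pvFact (a - 1), t)).2
    = t + ((PySem.List.pyRange a b 1).map
        (fun x => if x ∈ nums then pvFact x else 0)).sum := by
  by_cases hab : a < b
  · rw [PySem.List.pyRange_one_cons hab]
    simp only [List.foldl_cons, List.map_cons, List.sum_cons]
    rw [pvFact_step a h]
    have ih := loopA nums (a + 1) b (if a ∈ nums then t + pvFact a else t) (by omega)
    rw [show (a + 1 - 1 : Int) = a by ring] at ih
    rw [ih]
    split_ifs <;> ring
  · rw [PySem.List.pyRange_one_eq_nil (by omega)]
    simp
termination_by (b - a).toNat
decreasing_by omega

-- B's loop, from a consistent state, sums pvFact v over the values v ≥ 1 of vs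
lemma loopB (vs : List Int) (hs : vs.Pairwise (· < ·)) (t c nx : Int) (hnx : 1 ≤ nx)
    (hc : c = pvFact (nx - 1)) (hall : ∀ v ∈ vs, 1 ≤ v → nx ≤ v + 1) :
    ((vs.foldl
      (fun (st : Int × Int × Int) v =>
        if 1 ≤ v then
          let fact := (PySem.List.pyRange st.2.2 (v + 1) 1).foldl (fun f a => f * a) st.2.1
          (st.1 + fact, fact, v + 1)
        else st)
      (t, c, nx)).1)
    = t + (vs.map (fun v => if 1 ≤ v then pvFact v else 0)).sum := by
  induction vs generalizing t c nx with
  | nil => simp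
  | cons v rest ih =>
    simp only [List.foldl_cons, List.map_cons, List.sum_cons]
    by_cases hv : 1 ≤ v
    · simp only [if_pos hv]
      have hfact : (PySem.List.pyRange nx (v + 1) 1).foldl (fun f a => f * a) c = pvFact v := by
        rw [hc]; exact pvFact_extend nx v hnx (hall v (by simp) hv)
      rw [hfact]
      rw [ih (List.pairwise_cons.mp hs).2 (t + pvFact v) (pvFact v) (v + 1) (by omega)
        (by rw [show (v + 1 - 1 : Int) = v by ring])
        (fun w hw _ => by have := (List.pairwise_cons.mp hs).1 w hw; omega)]
      ring
    · simp only [if_neg hv]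
      rw [ih (List.pairwise_cons.mp hs).2 t c nx hnx hc (fun w hw h1 => hall w (by simp [hw]) h1)]
      ring

-- every element of a ≤-pairwise list is ≤ its last element
lemma le_getLast_of_pairwise (l : List Int) (hp : l.Pairwise (· ≤ ·)) (y : Int)
    (hy : y ∈ l) (hne : l ≠ []) : y ≤ l.getLast hne := by
  have hsplit := List.dropLast_concat_getLast hne
  rw [← hsplit] at hp hy
  rcases List.mem_append.mp hy with h1 | h2
  · exact (List.pairwise_append.mp hp).2.2 y h1 _ (List.mem_singleton_self _)
  · rw [List.mem_singleton.mp h2]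

-- B's result is the sum of the guarded factorials over the distinct elements
lemma altB (lst : List Int) :
    sum_factorial_alt lst
    = ((PySem.Set.ofList lst).map (fun v => if 1 ≤ v then pvFact v else 0)).sum := by
  unfold sum_factorial_alt
  rw [loopB _ (by simpa using PySem.List.sorted_ofList_pairwise_lt (xs := lst)) 0 1 1 le_rfl
    (by decide) (fun v _ h1 => by omega), zero_add]
  exact ((PySem.List.sorted_perm (PySem.Set.ofList lst) (fun x => x) false).map _).sum_eq

-- ===== VERDICT (by name: the statement is the Claim_ definition above) =====
theorem sum_factorial_spec : Claim_equal_sum_factorial := by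
  intro lst _ hpre
  unfold Spec_sum_factorial sum_factorial
  set nums := PySem.List.sorted lst (fun x => x) false with hnums
  have hperm : nums.Perm lst := PySem.List.sorted_perm lst (fun x => x) false
  have hnne : nums ≠ [] := by
    intro h
    have := hperm.length_eq
    rw [h] at this
    exact hpre (List.eq_nil_of_length_eq_zero this.symm)
  have hlast : PySem.List.pyGetD nums (-1) 0 = nums.getLast hnne :=
    PySem.List.pyGetD_neg_one nums 0 hnne
  set m := nums.getLast hnne with hm
  simp only [hlast]
  have h0 : (1 : Int) = pvFact (1 - 1) := by decide
  rw [show ((1 : Int), (0 : Int)) = (pvFact (1 - 1), (0 : Int)) from by rw [← h0]]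
  rw [loopA nums 1 (m + 1) 0 le_rfl]
  rw [altB]
  -- both sides are sums over nodup lists; compare as Finset sums
  have hmemnums : ∀ x, x ∈ nums ↔ x ∈ lst := fun x => hperm.mem_iff
  have hmax : ∀ y ∈ lst, y ≤ m := by
    intro y hy
    exact le_getLast_of_pairwise nums
      (by simpa using PySem.List.sorted_pairwise lst (fun x => x)) y ((hmemnums y).mpr hy) hnne
  have hA : ((PySem.List.pyRange 1 (m + 1) 1).map
        (fun x => if x ∈ nums then pvFact x else 0)).sum
      = ∑ x ∈ (PySem.List.pyRange 1 (m + 1) 1).toFinset,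
          (if x ∈ nums then pvFact x else 0) :=
    Eq.symm (List.sum_toFinset _ (PySem.List.nodup_pyRange_one 1 (m + 1)))
  have hB : ((PySem.Set.ofList lst).map (fun v => if 1 ≤ v then pvFact v else 0)).sum
      = ∑ x ∈ (PySem.Set.ofList lst).toFinset, (if 1 ≤ x then pvFact x else 0) :=
    Eq.symm (List.sum_toFinset _ (PySem.Set.nodup_ofList lst))
  rw [hA, hB, zero_add, ← Finset.sum_filter, ← Finset.sum_filter]
  apply Finset.sum_congr
  · ext x
    simp only [Finset.mem_filter, List.mem_toFinset, PySem.List.mem_pyRange_one,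
      PySem.Set.mem_ofList, hmemnums]
    constructor
    · rintro ⟨⟨h1, _⟩, h3⟩; exact ⟨h3, h1⟩
    · rintro ⟨h1, h2⟩; exact ⟨⟨h2, by have := hmax x h1; omega⟩, h1⟩
  · intro x _; rfl
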